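-- pv_equiv track=rewrite | github.com/takahh/vqatom | make_train_data_etc.py | choose_best_chain_across_pdbids_cached_with_mode
-- ===== SOURCE A (Python) =====
-- from typing import Optional, Dict, Tuple, List
--
-- def choose_best_chain_across_pdbids_cached_with_mode(
--     pdbids: List[str],
--     pdb_cache_map,
-- ):
--     """
--     returns:
--       (best_pdbid, best_chain, best_seq, debug_status, mode, contact_mask, contact_n)
--     """
--     debug = []
--
--     for pdbid in pdbids:
--         row = pdb_cache_map.get(pdbid)
--         if row is None:
--             debug.append(f"{pdbid}:missing_cache:0:0")
--             continue
--
--         chain_id, seq, status, top_contacts, second_contacts, contact_mask, contact_n = row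
--         debug.append(f"{pdbid}:{status}:{top_contacts}:{second_contacts}")
--
--         if status == "ok_single_chain":
--             return pdbid, chain_id, seq, "ok_single_chain", "single", contact_mask, contact_n
--
--     best_pdbid = None
--     best_chain = None
--     best_seq = None
--     best_contacts = -1
--     best_second = 0
--     best_contact_mask = ""
--     best_contact_n = 0
--
--     for pdbid in pdbids:
--         row = pdb_cache_map.get(pdbid)
--         if row is None:
--             continue
--
--         chain_id, seq, status, top_contacts, second_contacts, contact_mask, contact_n = row
--         if status != "ok":
--             continue
--
--         if top_contacts > best_contacts:
--             best_pdbid = pdbid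
--             best_chain = chain_id
--             best_seq = seq
--             best_contacts = top_contacts
--             best_second = second_contacts
--             best_contact_mask = contact_mask
--             best_contact_n = contact_n
--
--     if best_pdbid is not None:
--         return best_pdbid, best_chain, best_seq, f"ok:{best_contacts}:{best_second}", "multi", best_contact_mask, best_contact_n
--
--     return None, None, None, "all_failed|" + "|".join(debug), "none", "", 0
-- ===== SOURCE B (Python) =====
-- from typing import Optional, Dict, Tuple, List
--
-- def choose_best_chain_across_pdbids_cached_with_mode(
--     pdbids: List[str],
--     pdb_cache_map,
-- ):
--     """
--     Single pass: accumulate debug, return at once on a single-chain hit,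
--     and keep the running best 'ok' row (strict '>', first maximal wins).
--     """
--     debug = []
--     best = None  # (pdbid, chain_id, seq, second_contacts, contact_mask, contact_n)
--     best_contacts = -1
--
--     for pdbid in pdbids:
--         row = pdb_cache_map.get(pdbid)
--         if row is None:
--             debug.append(f"{pdbid}:missing_cache:0:0")
--             continue
--
--         chain_id, seq, status, top_contacts, second_contacts, contact_mask, contact_n = row
--         debug.append(f"{pdbid}:{status}:{top_contacts}:{second_contacts}")
--
--         if status == "ok_single_chain":
--             return pdbid, chain_id, seq, "ok_single_chain", "single", contact_mask, contact_n
--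
--         if status == "ok" and top_contacts > best_contacts:
--             best = (pdbid, chain_id, seq, second_contacts, contact_mask, contact_n)
--             best_contacts = top_contacts
--
--     if best is not None:
--         p, c, s, sec, cm, cn = best
--         return p, c, s, f"ok:{best_contacts}:{sec}", "multi", cm, cn
--
--     return None, None, None, "all_failed|" + "|".join(debug), "none", "", 0
-- ===== Notes on version B (the rewrite author's own statement) =====
-- stated objective: simpler
-- what changed: Replaces A's two sequential scans of pdbids (debug/early-return pass, then a separate best-'ok' pass) with one fused pass that accumulates debug, returns on the first single-chain hit, and maintains the running best 'ok' candidate in a single tuple.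
import Mathlib
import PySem

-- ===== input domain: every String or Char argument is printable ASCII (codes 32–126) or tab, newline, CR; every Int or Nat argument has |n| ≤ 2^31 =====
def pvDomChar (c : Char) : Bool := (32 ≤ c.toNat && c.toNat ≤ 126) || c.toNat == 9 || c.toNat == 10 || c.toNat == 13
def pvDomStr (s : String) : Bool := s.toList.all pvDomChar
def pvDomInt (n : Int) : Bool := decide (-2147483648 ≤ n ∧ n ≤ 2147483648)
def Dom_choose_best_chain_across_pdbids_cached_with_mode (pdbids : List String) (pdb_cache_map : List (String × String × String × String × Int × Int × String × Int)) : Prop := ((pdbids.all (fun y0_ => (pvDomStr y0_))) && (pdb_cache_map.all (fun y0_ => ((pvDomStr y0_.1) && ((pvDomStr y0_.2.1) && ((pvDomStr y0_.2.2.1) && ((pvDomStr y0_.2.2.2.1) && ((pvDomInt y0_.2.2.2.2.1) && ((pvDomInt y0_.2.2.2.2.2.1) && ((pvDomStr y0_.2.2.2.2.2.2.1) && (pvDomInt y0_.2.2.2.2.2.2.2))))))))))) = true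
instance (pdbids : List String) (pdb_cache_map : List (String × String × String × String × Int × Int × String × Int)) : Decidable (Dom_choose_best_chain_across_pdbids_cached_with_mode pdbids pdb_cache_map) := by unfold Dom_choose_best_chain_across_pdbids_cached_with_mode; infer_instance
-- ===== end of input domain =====

-- B fuses A's two sequential scans of pdbids into one pass that accumulates debug,
-- early-returns on a single-chain hit and tracks the running best 'ok' row (simpler; same cost).
-- dict → association list per convention; .get = first match on the key:
def pvGet (m : List (String × String × String × String × Int × Int × String × Int)) (k : String) : Option (String × String × String × Int × Int × String × Int) :=
  (m.find? (fun r => r.1 == k)).map (·.2)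

def pvRet := Option String × Option String × Option String × String × String × String × Int

def pvDebugMiss (pdbid : String) : String := pdbid ++ ":missing_cache:0:0"

def pvDebugRow (pdbid status : String) (top second : Int) : String :=
  pdbid ++ ":" ++ status ++ ":" ++ PySem.Int.toStr top ++ ":" ++ PySem.Int.toStr second

-- ===== PORT A =====
-- first loop of A: builds debug, may early-return on "ok_single_chain"
def pvA_phase1 (m : List (String × String × String × String × Int × Int × String × Int)) :
    List String → List String → pvRet ⊕ List String
  | [], debug => .inr debug
  | p :: rest, debug =>
    match pvGet m p with
    | none => pvA_phase1 m rest (debug ++ [pvDebugMiss p])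
    | some (c, s, st, tc, sc, cm, cn) =>
      let debug' := debug ++ [pvDebugRow p st tc sc]
      if st == "ok_single_chain" then .inl (some p, some c, some s, "ok_single_chain", "single", cm, cn)
      else pvA_phase1 m rest debug'

-- second loop of A: best_* accumulator (best_pdbid, best_chain, best_seq, best_contacts, best_second, best_contact_mask, best_contact_n)
def pvAState := Option String × Option String × Option String × Int × Int × String × Int

def pvA_phase2 (m : List (String × String × String × String × Int × Int × String × Int)) :
    List String → pvAState → pvAState
  | [], st => st
  | p :: rest, (bp, bc, bs, bct, bsec, bcm, bcn) =>
    match pvGet m p with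
    | none => pvA_phase2 m rest (bp, bc, bs, bct, bsec, bcm, bcn)
    | some (c, s, st, tc, sc, cm, cn) =>
      if st != "ok" then pvA_phase2 m rest (bp, bc, bs, bct, bsec, bcm, bcn)
      else if tc > bct then pvA_phase2 m rest (some p, some c, some s, tc, sc, cm, cn)
      else pvA_phase2 m rest (bp, bc, bs, bct, bsec, bcm, bcn)

def pvA_finish (st : pvAState) (debug : List String) : pvRet :=
  match st with
  | (some p, bc, bs, bct, bsec, bcm, bcn) =>
    (some p, bc, bs, "ok:" ++ PySem.Int.toStr bct ++ ":" ++ PySem.Int.toStr bsec, "multi", bcm, bcn)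
  | (none, _, _, _, _, _, _) =>
    (none, none, none, "all_failed|" ++ PySem.Str.join "|" debug, "none", "", 0)

def choose_best_chain_across_pdbids_cached_with_mode (pdbids : List String) (pdb_cache_map : List (String × String × String × String × Int × Int × String × Int)) : Option String × Option String × Option String × String × String × String × Int :=
  match pvA_phase1 pdb_cache_map pdbids [] with
  | .inl r => r
  | .inr debug => pvA_finish (pvA_phase2 pdb_cache_map pdbids (none, none, none, -1, 0, "", 0)) debug

-- ===== PORT B =====
-- single fused pass; best : Option (pdbid, chain, seq, second, mask, n), best_contacts separate
def pvBBest := Option (String × String × String × Int × String × Int)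

def pvB_finish (best : pvBBest) (bct : Int) (debug : List String) : pvRet :=
  match best with
  | some (p, c, s, sec, cm, cn) =>
    (some p, some c, some s, "ok:" ++ PySem.Int.toStr bct ++ ":" ++ PySem.Int.toStr sec, "multi", cm, cn)
  | none => (none, none, none, "all_failed|" ++ PySem.Str.join "|" debug, "none", "", 0)

def pvB_loop (m : List (String × String × String × String × Int × Int × String × Int)) :
    List String → List String → pvBBest → Int → pvRet
  | [], debug, best, bct => pvB_finish best bct debug
  | p :: rest, debug, best, bct =>
    match pvGet m p with
    | none => pvB_loop m rest (debug ++ [pvDebugMiss p]) best bct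
    | some (c, s, st, tc, sc, cm, cn) =>
      let debug' := debug ++ [pvDebugRow p st tc sc]
      if st == "ok_single_chain" then (some p, some c, some s, "ok_single_chain", "single", cm, cn)
      else if st == "ok" && tc > bct then pvB_loop m rest debug' (some (p, c, s, sc, cm, cn)) tc
      else pvB_loop m rest debug' best bct

def choose_best_chain_across_pdbids_cached_with_mode_alt (pdbids : List String) (pdb_cache_map : List (String × String × String × String × Int × Int × String × Int)) : Option String × Option String × Option String × String × String × String × Int :=
  pvB_loop pdb_cache_map pdbids [] none (-1)

-- ===== PRECONDITION & SPEC =====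
def Spec_choose_best_chain_across_pdbids_cached_with_mode (pdbids : List String) (pdb_cache_map : List (String × String × String × String × Int × Int × String × Int)) (out : Option String × Option String × Option String × String × String × String × Int) : Prop := out = choose_best_chain_across_pdbids_cached_with_mode_alt pdbids pdb_cache_map
instance (pdbids : List String) (pdb_cache_map : List (String × String × String × String × Int × Int × String × Int)) (out : Option String × Option String × Option String × String × String × String × Int) : Decidable (Spec_choose_best_chain_across_pdbids_cached_with_mode pdbids pdb_cache_map out) := by unfold Spec_choose_best_chain_across_pdbids_cached_with_mode; infer_instance

-- ===== CLAIM (what is proved, stated in full; the proofs are below) =====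
def Claim_equal_choose_best_chain_across_pdbids_cached_with_mode : Prop := ∀ (pdbids : List String) (pdb_cache_map : List (String × String × String × String × Int × Int × String × Int)), Dom_choose_best_chain_across_pdbids_cached_with_mode pdbids pdb_cache_map → Spec_choose_best_chain_across_pdbids_cached_with_mode pdbids pdb_cache_map (choose_best_chain_across_pdbids_cached_with_mode pdbids pdb_cache_map)

-- ===== LEMMAS AND PROOFS =====

-- B's (best, best_contacts) state viewed as A's phase-2 accumulator
def pvConv (best : pvBBest) (bct : Int) : pvAState :=
  match best with
  | none => (none, none, none, bct, 0, "", 0)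
  | some (p, c, s, sec, cm, cn) => (some p, some c, some s, bct, sec, cm, cn)

lemma pvB_finish_eq (best : pvBBest) (bct : Int) (debug : List String) :
    pvB_finish best bct debug = pvA_finish (pvConv best bct) debug := by
  cases best with
  | none => rfl
  | some t => obtain ⟨p, c, s, sec, cm, cn⟩ := t; rfl

-- the fusion invariant: one B pass = A's first pass, then A's second pass from the converted state
lemma pvB_loop_eq (m : List (String × String × String × String × Int × Int × String × Int)) :
    ∀ (ps : List String) (debug : List String) (best : pvBBest) (bct : Int),
      pvB_loop m ps debug best bct =
        match pvA_phase1 m ps debug with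
        | .inl r => r
        | .inr d => pvA_finish (pvA_phase2 m ps (pvConv best bct)) d := by
  intro ps
  induction ps with
  | nil => intro debug best bct; simp [pvB_loop, pvA_phase1, pvA_phase2, pvB_finish_eq]
  | cons p rest ih =>
    intro debug best bct
    cases hget : pvGet m p with
    | none =>
      cases best with
      | none =>
        simp only [pvB_loop, pvA_phase1, pvA_phase2, pvConv, hget]
        exact ih _ _ _
      | some t =>
        obtain ⟨bp, bc, bs, bsec, bcm, bcn⟩ := t
        simp only [pvB_loop, pvA_phase1, pvA_phase2, pvConv, hget]
        exact ih _ _ _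
    | some row =>
      obtain ⟨c, s, st, tc, sc, cm, cn⟩ := row
      by_cases hsingle : st == "ok_single_chain"
      · simp [pvB_loop, pvA_phase1, hget, hsingle]
      · by_cases hok : st == "ok"
        · have hne : (st != "ok") = false := by simp_all
          by_cases hgt : tc > bct
          · cases best with
            | none =>
              simp only [pvB_loop, pvA_phase1, pvA_phase2, pvConv, hget, hsingle, hok, hne,
                Bool.false_eq_true, if_false, Bool.true_and, hgt, if_true]
              exact ih _ _ _
            | some t =>
              obtain ⟨bp, bc, bs, bsec, bcm, bcn⟩ := t
              simp only [pvB_loop, pvA_phase1, pvA_phase2, pvConv, hget, hsingle, hok, hne,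
                Bool.false_eq_true, if_false, Bool.true_and, hgt, if_true]
              exact ih _ _ _
          · cases best with
            | none =>
              simp only [pvB_loop, pvA_phase1, pvA_phase2, pvConv, hget, hsingle, hok, hne,
                Bool.false_eq_true, if_false, Bool.true_and, hgt]
              exact ih _ _ _
            | some t =>
              obtain ⟨bp, bc, bs, bsec, bcm, bcn⟩ := t
              simp only [pvB_loop, pvA_phase1, pvA_phase2, pvConv, hget, hsingle, hok, hne,
                Bool.false_eq_true, if_false, Bool.true_and, hgt]
              exact ih _ _ _
        · have hne : (st != "ok") = true := by simp_all
          cases best with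
          | none =>
            simp only [pvB_loop, pvA_phase1, pvA_phase2, pvConv, hget, hsingle, hok, hne,
              Bool.false_eq_true, if_false, Bool.false_and]
            exact ih _ _ _
          | some t =>
            obtain ⟨bp, bc, bs, bsec, bcm, bcn⟩ := t
            simp only [pvB_loop, pvA_phase1, pvA_phase2, pvConv, hget, hsingle, hok, hne,
              Bool.false_eq_true, if_false, Bool.false_and]
            exact ih _ _ _

-- ===== VERDICT (by name: the statement is the Claim_ definition above) =====
theorem choose_best_chain_across_pdbids_cached_with_mode_spec : Claim_equal_choose_best_chain_across_pdbids_cached_with_mode := by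
  intro pdbids m _
  unfold Spec_choose_best_chain_across_pdbids_cached_with_mode
  unfold choose_best_chain_across_pdbids_cached_with_mode choose_best_chain_across_pdbids_cached_with_mode_alt
  rw [pvB_loop_eq m pdbids [] none (-1)]
  rfl
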